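-- pv_equiv track=rewrite | github.com/BasUitermark/RandomShopData | CLI/old/v1/library.py | convert_copper_to_currency
-- ===== SOURCE A (Python) =====
-- def convert_copper_to_currency(copper_value):
--     conversion_rates = {
--         'pp': 10 * 10 * 10,  # Platinum to Gold to Silver to Copper
--         'gp': 10 * 10,  # Gold to Silver to Copper
--         'sp': 10,  # Silver to Copper
--         'cp': 1  # Copper
--     }
--
--     conversion_order = ['pp', 'gp', 'sp', 'cp']
--     result = ''
--
--     for currency in conversion_order:
--         conversion_rate = conversion_rates[currency]
--         amount = copper_value // conversion_rate
--
--         if amount > 0: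
--             result += f"{amount} {currency} "
--
--         copper_value %= conversion_rate
--
--     return result.strip()
-- ===== SOURCE B (Python) =====
-- def convert_copper_to_currency(copper_value):
--     def go(n, names):
--         if len(names) == 1:
--             return [f"{n} {names[0]}"] if n > 0 else []
--         amount = n % 10
--         higher = go(n // 10, names[1:])
--         return higher + ([f"{amount} {names[0]}"] if amount > 0 else [])
--     return ' '.join(go(copper_value, ['cp', 'sp', 'gp', 'pp']))
-- ===== Notes on version B (the rewrite author's own statement) =====
-- stated objective: alternative
-- what changed: Replaces A's high-to-low running-remainder loop over a rate dict by a recursion that peels the LEAST significant digit first (n % 10, recurse on n // 10 with the next denomination name), builds the parts list back-to-front, and joins once; the platinum amount emerges as the final un-divided quotient rather than a // 1000.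
import Mathlib
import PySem

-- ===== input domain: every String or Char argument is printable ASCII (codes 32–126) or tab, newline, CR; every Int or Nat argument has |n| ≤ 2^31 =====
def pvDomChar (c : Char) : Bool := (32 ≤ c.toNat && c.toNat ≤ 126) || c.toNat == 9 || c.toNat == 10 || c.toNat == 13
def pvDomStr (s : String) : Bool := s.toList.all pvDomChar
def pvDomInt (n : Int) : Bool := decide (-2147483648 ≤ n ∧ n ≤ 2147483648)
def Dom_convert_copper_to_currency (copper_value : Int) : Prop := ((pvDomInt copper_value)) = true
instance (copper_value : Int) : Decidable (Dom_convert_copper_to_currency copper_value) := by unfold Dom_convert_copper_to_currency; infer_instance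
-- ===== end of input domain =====

-- B replaces A's high-to-low running-remainder loop over a rate dict by a recursion that
-- peels the least significant digit first and builds the parts list back-to-front.

-- ===== PORT A =====
def convert_copper_to_currency (copper_value : Int) : String :=
  let conversion_rates : PySem.Dict String Int :=
    ((((PySem.Dict.empty).insert "pp" (10 * 10 * 10)).insert "gp" (10 * 10)).insert "sp" 10).insert "cp" 1
  let conversion_order : List String := ["pp", "gp", "sp", "cp"]
  let st := conversion_order.foldl (fun (st : String × Int) currency =>
      let conversion_rate := conversion_rates.getD currency 0
      let amount := PySem.Int.floordiv st.2 conversion_rate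
      let result := if amount > 0
        then st.1 ++ PySem.Int.toStr amount ++ " " ++ currency ++ " "
        else st.1
      (result, PySem.Int.mod st.2 conversion_rate)) ("", copper_value)
  PySem.Str.strip st.1

-- ===== PORT B =====
-- inner helper 'go' of Source B: recursion on the name list, low denomination first
def pvGoB (n : Int) (names : List String) : List String :=
  match names with
  | [] => []                                           -- unreachable from the call below
  | [name] => if n > 0 then [PySem.Int.toStr n ++ " " ++ name] else []
  | name :: rest =>
      let amount := PySem.Int.mod n 10
      let higher := pvGoB (PySem.Int.floordiv n 10) rest
      higher ++ (if amount > 0 then [PySem.Int.toStr amount ++ " " ++ name] else [])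

def convert_copper_to_currency_alt (copper_value : Int) : String :=
  PySem.Str.join " " (pvGoB copper_value ["cp", "sp", "gp", "pp"])

-- ===== PRECONDITION & SPEC =====
def Spec_convert_copper_to_currency (copper_value : Int) (out : String) : Prop := out = convert_copper_to_currency_alt copper_value
instance (copper_value : Int) (out : String) : Decidable (Spec_convert_copper_to_currency copper_value out) := by unfold Spec_convert_copper_to_currency; infer_instance

-- ===== CLAIM (what is proved, stated in full; the proofs are below) =====
def Claim_equal_convert_copper_to_currency : Prop := ∀ (copper_value : Int), Dom_convert_copper_to_currency copper_value → Spec_convert_copper_to_currency copper_value (convert_copper_to_currency copper_value)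

-- ===== LEMMAS AND PROOFS =====

theorem pvDigitChar_not_space (m : Nat) : PySem.Chars.isspace (Nat.digitChar m) = false := by
  rcases Nat.lt_or_ge m 16 with h | h
  · interval_cases m <;> decide
  · rw [Nat.digitChar, if_neg (by omega), if_neg (by omega), if_neg (by omega), if_neg (by omega),
      if_neg (by omega), if_neg (by omega), if_neg (by omega), if_neg (by omega), if_neg (by omega),
      if_neg (by omega), if_neg (by omega), if_neg (by omega), if_neg (by omega), if_neg (by omega),
      if_neg (by omega), if_neg (by omega)]
    decide

theorem pvToDigitsCore_succ (b f n : Nat) (ds : List Char) :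
    Nat.toDigitsCore b (f+1) n ds =
      if n / b = 0 then (n % b).digitChar :: ds
      else Nat.toDigitsCore b f (n / b) ((n % b).digitChar :: ds) := rfl

theorem pvToDigitsCore_ne_nil (b : Nat) (f : Nat) (n : Nat) (acc : List Char) (h : acc ≠ []) :
    Nat.toDigitsCore b f n acc ≠ [] := by
  induction f generalizing n acc with
  | zero => simpa [Nat.toDigitsCore]
  | succ f ih =>
    rw [pvToDigitsCore_succ]
    by_cases hq : n / b = 0
    · simp [hq]
    · rw [if_neg hq]; exact ih _ _ (by simp)

theorem pvMem_toDigitsCore (b : Nat) (f : Nat) (n : Nat) (acc : List Char) (c : Char)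
    (hc : c ∈ Nat.toDigitsCore b f n acc) : (∃ m, c = Nat.digitChar m) ∨ c ∈ acc := by
  induction f generalizing n acc with
  | zero => simp only [show Nat.toDigitsCore b 0 n acc = acc from rfl] at hc; exact Or.inr hc
  | succ f ih =>
    rw [pvToDigitsCore_succ] at hc
    by_cases hq : n / b = 0
    · rw [if_pos hq] at hc
      rcases List.mem_cons.mp hc with h | h
      · exact Or.inl ⟨_, h⟩
      · exact Or.inr h
    · rw [if_neg hq] at hc
      rcases ih _ _ hc with h | h
      · exact Or.inl h
      · rcases List.mem_cons.mp h with h | h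
        · exact Or.inl ⟨_, h⟩
        · exact Or.inr h

theorem pvToChars_pos (a : Int) (ha : 0 < a) :
    ∃ c cs, PySem.Int.toChars a = c :: cs ∧ PySem.Chars.isspace c = false := by
  have hne : PySem.Int.toChars a ≠ [] := by
    simp only [PySem.Int.toChars, if_neg (by omega : ¬ a < 0)]
    unfold Nat.toDigits
    rw [pvToDigitsCore_succ]
    by_cases hq : a.toNat / 10 = 0
    · simp [hq]
    · rw [if_neg hq]; exact pvToDigitsCore_ne_nil _ _ _ _ (by simp)
  obtain ⟨c, cs, hcs⟩ := List.exists_cons_of_ne_nil hne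
  refine ⟨c, cs, hcs, ?_⟩
  have hc : c ∈ PySem.Int.toChars a := by rw [hcs]; simp
  rw [PySem.Int.toChars, if_neg (by omega : ¬ a < 0)] at hc
  rcases pvMem_toDigitsCore _ _ _ _ _ hc with ⟨m, rfl⟩ | h
  · exact pvDigitChar_not_space m
  · simp at h

-- str.strip of a word list that starts with a positive number and ends "…p " just drops the final space
theorem pvStrip_key' (a : Int) (ha : 0 < a) (m L : List Char)
    (hL : L = (PySem.Int.toChars a ++ m) ++ [' '])
    (hl : (PySem.Int.toChars a ++ m).getLast? = some 'p') :
    PySem.Chars.strip L = PySem.Int.toChars a ++ m := by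
  subst hL
  obtain ⟨c, cs, ht, hc⟩ := pvToChars_pos a ha
  obtain ⟨l', hl'⟩ := List.getLast?_eq_some_iff.mp hl
  simp only [PySem.Chars.strip, PySem.Chars.lstrip, PySem.Chars.rstrip]
  have h1 : List.dropWhile PySem.Chars.isspace ((PySem.Int.toChars a ++ m) ++ [' ']) =
      (PySem.Int.toChars a ++ m) ++ [' '] := by
    rw [ht]
    simp only [List.cons_append]
    rw [List.dropWhile_cons_of_neg (by simp [hc])]
  rw [h1, hl']
  simp only [List.reverse_append, List.reverse_cons, List.reverse_nil, List.nil_append,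
    List.cons_append]
  rw [List.dropWhile_cons_of_pos (by decide), List.dropWhile_cons_of_neg (by decide)]
  simp

-- ===== VERDICT (by name: the statement is the Claim_ definition above) =====
theorem convert_copper_to_currency_spec : Claim_equal_convert_copper_to_currency := by
  intro v _
  unfold Spec_convert_copper_to_currency
  unfold convert_copper_to_currency convert_copper_to_currency_alt
  have hd1 : ((((PySem.Dict.empty.insert "pp" ((10:Int) * 10 * 10)).insert "gp" (10 * 10)).insert "sp" 10).insert "cp" 1).getD "pp" 0 = 1000 := by decide
  have hd2 : ((((PySem.Dict.empty.insert "pp" ((10:Int) * 10 * 10)).insert "gp" (10 * 10)).insert "sp" 10).insert "cp" 1).getD "gp" 0 = 100 := by decide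
  have hd3 : ((((PySem.Dict.empty.insert "pp" ((10:Int) * 10 * 10)).insert "gp" (10 * 10)).insert "sp" 10).insert "cp" 1).getD "sp" 0 = 10 := by decide
  have hd4 : ((((PySem.Dict.empty.insert "pp" ((10:Int) * 10 * 10)).insert "gp" (10 * 10)).insert "sp" 10).insert "cp" 1).getD "cp" 0 = 1 := by decide
  -- A's running-remainder amounts, rewritten to canonical digit forms
  have e1 : PySem.Int.floordiv (PySem.Int.mod v 1000) 100 = v / 100 % 10 := by
    rw [PySem.Int.floordiv_eq_ediv_of_pos (by norm_num), PySem.Int.mod_eq_emod_of_pos (by norm_num)]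
    omega
  have e2 : PySem.Int.floordiv (PySem.Int.mod (PySem.Int.mod v 1000) 100) 10 = v / 10 % 10 := by
    rw [PySem.Int.floordiv_eq_ediv_of_pos (by norm_num), PySem.Int.mod_eq_emod_of_pos (by norm_num),
      PySem.Int.mod_eq_emod_of_pos (by norm_num)]
    omega
  have e3 : PySem.Int.floordiv (PySem.Int.mod (PySem.Int.mod (PySem.Int.mod v 1000) 100) 10) 1 = v % 10 := by
    rw [PySem.Int.floordiv_eq_ediv_of_pos (by norm_num), PySem.Int.mod_eq_emod_of_pos (by norm_num),
      PySem.Int.mod_eq_emod_of_pos (by norm_num), PySem.Int.mod_eq_emod_of_pos (by norm_num)]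
    omega
  have f1 : PySem.Int.floordiv v 1000 = v / 1000 := PySem.Int.floordiv_eq_ediv_of_pos (by norm_num)
  -- B's low-to-high recursion amounts, rewritten to the same canonical forms
  have g1 : PySem.Int.mod v 10 = v % 10 := PySem.Int.mod_eq_emod_of_pos (by norm_num)
  have g2 : PySem.Int.mod (PySem.Int.floordiv v 10) 10 = v / 10 % 10 := by
    rw [PySem.Int.mod_eq_emod_of_pos (by norm_num), PySem.Int.floordiv_eq_ediv_of_pos (by norm_num)]
  have g3 : PySem.Int.mod (PySem.Int.floordiv (PySem.Int.floordiv v 10) 10) 10 = v / 100 % 10 := by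
    rw [PySem.Int.mod_eq_emod_of_pos (by norm_num), PySem.Int.floordiv_eq_ediv_of_pos (by norm_num),
      PySem.Int.floordiv_eq_ediv_of_pos (by norm_num)]
    omega
  have g4 : PySem.Int.floordiv (PySem.Int.floordiv (PySem.Int.floordiv v 10) 10) 10 = v / 1000 := by
    rw [PySem.Int.floordiv_eq_ediv_of_pos (by norm_num), PySem.Int.floordiv_eq_ediv_of_pos (by norm_num),
      PySem.Int.floordiv_eq_ediv_of_pos (by norm_num)]
    omega
  simp only [List.foldl, hd1, hd2, hd3, hd4, e1, e2, e3, f1, pvGoB, g1, g2, g3, g4]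
  by_cases h1 : v / 1000 > 0 <;>
  by_cases h2 : v / 100 % 10 > 0 <;>
  by_cases h3 : v / 10 % 10 > 0 <;>
  by_cases h4 : v % 10 > 0 <;>
  simp only [h1, h2, h3, h4, if_pos, if_neg, not_false_iff] <;>
  (apply String.toList_inj.mp) <;>
  simp [PySem.Chars.join, List.intercalate] <;>
  first
    | decide
    | (refine pvStrip_key' _ h1 _ _ ?_ ?_ <;> simp [List.getLast?_cons, List.getLast?_append])
    | (refine pvStrip_key' _ h2 _ _ ?_ ?_ <;> simp [List.getLast?_cons, List.getLast?_append])
    | (refine pvStrip_key' _ h3 _ _ ?_ ?_ <;> simp [List.getLast?_cons, List.getLast?_append])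
    | (refine pvStrip_key' _ h4 _ _ ?_ ?_ <;> simp [List.getLast?_cons, List.getLast?_append])
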